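-- pv_equiv track=rewrite | github.com/Caeadyen/Advent-of-Code-2023 | Day13/day13.py | checkCol2
-- ===== SOURCE A (Python) =====
-- def checkCol2(block):
-- 	tmp = list(zip(*block))
-- 	for col in range(1, len(tmp)):
-- 		above = tmp[:col][::-1]
-- 		below = tmp[col:]
-- 		above = above[:len(below)]
-- 		below = below[:len(above)]
-- 		checksum = 0
-- 		for x ,y in zip(above,below):
-- 			for c1, c2 in zip(x,y):
-- 				if c1 != c2:
-- 					checksum += 1
--
-- 		if checksum == 1:
-- 			return col
-- 	return 0
-- ===== SOURCE B (Python) =====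
-- def checkCol2(block):
--     cols = list(zip(*block))
--     n = len(cols)
--     for col in range(1, n):
--         bad = [(a, b) for a, b in zip(range(col - 1, -1, -1), range(col, n)) if cols[a] != cols[b]]
--         if len(bad) == 1:
--             a, b = bad[0]
--             if sum(c1 != c2 for c1, c2 in zip(cols[a], cols[b])) == 1:
--                 return col
--     return 0
-- ===== Notes on version B (the rewrite author's own statement) =====
-- stated objective: alternative
-- what changed: Instead of A's counting of every mirrored character mismatch per candidate split, B first collects the reflected column PAIRS that are unequal as whole tuples (one tuple comparison each), demands exactly one such pair, and only then scans that single pair character-by-character to verify it differs in exactly one cell; the exhaustive per-split character count disappears.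
import Mathlib
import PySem

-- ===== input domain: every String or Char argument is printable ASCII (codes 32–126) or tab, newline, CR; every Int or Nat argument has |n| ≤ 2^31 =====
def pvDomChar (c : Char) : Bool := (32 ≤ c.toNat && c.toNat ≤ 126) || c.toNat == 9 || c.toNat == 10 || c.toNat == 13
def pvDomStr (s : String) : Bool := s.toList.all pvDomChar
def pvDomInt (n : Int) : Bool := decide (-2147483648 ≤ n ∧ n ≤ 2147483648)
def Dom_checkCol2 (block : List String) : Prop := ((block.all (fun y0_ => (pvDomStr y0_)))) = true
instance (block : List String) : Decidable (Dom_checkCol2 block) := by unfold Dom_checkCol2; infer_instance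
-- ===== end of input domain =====

-- B replaces A's exhaustive mismatch count per candidate split by a two-phase test: collect the
-- reflected column pairs that are unequal as whole columns, demand exactly one, then verify that
-- single pair differs in exactly one character; same results.

-- ===== PORT A =====
-- zip(*block) on the rows viewed as char sequences: take heads while every row is nonempty.
def pyZipStar (rows : List (List Char)) : List (List Char) :=
  match rows with
  | [] => []
  | r :: rs =>
    if h : ((r :: rs).any (fun l => l.isEmpty)) = true then []
    else ((r :: rs).map (fun l => l.headD ' ')) :: pyZipStar ((r :: rs).map List.tail)
termination_by (rows.headD []).length
decreasing_by
  simp only [List.any_cons, Bool.or_eq_true, List.any_eq_true, List.isEmpty_iff] at h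
  push Not at h
  simp only [List.map_cons, List.headD_cons]
  cases r with
  | nil => exact absurd rfl h.1
  | cons a t => simp

-- checksum accumulation of A's two nested for-loops over zip(above, below)
def checksumA (above below : List (List Char)) : Int :=
  (above.zip below).foldl
    (fun acc p => (p.1.zip p.2).foldl (fun a q => if q.1 ≠ q.2 then a + 1 else a) acc) 0

def loopA (tmp : List (List Char)) : List Int → Int
  | [] => 0
  | col :: rest =>
    let above0 := (PySem.List.slice tmp none (some col)).reverse   -- tmp[:col][::-1]
    let below0 := PySem.List.slice tmp (some col) none             -- tmp[col:]
    let above := PySem.List.slice above0 none (some (below0.length : Int))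
    let below := PySem.List.slice below0 none (some (above.length : Int))
    if checksumA above below = 1 then col else loopA tmp rest

def checkCol2 (block : List String) : Int :=
  let tmp := pyZipStar (block.map String.toList)
  loopA tmp (PySem.List.pyRange 1 (tmp.length : Int) 1)

-- ===== PORT B =====
-- sum(c1 != c2 for c1, c2 in zip(x, y)) : the single character-level verification of B
def cntB (x y : List Char) : Int :=
  (x.zip y).foldl (fun a q => if q.1 ≠ q.2 then a + 1 else a) 0

def loopB (cols : List (List Char)) (n : Int) : List Int → Int
  | [] => 0
  | col :: rest =>
    -- bad = [(a, b) for a, b in zip(range(col-1,-1,-1), range(col,n)) if cols[a] != cols[b]]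
    let bad := ((PySem.List.pyRange (col - 1) (-1) (-1)).zip (PySem.List.pyRange col n 1)).filter
        (fun p => decide (PySem.List.pyGet? cols p.1 ≠ PySem.List.pyGet? cols p.2))
    if bad.length = 1 then
      let p := bad.headD (0, 0)   -- bad[0], guarded by len(bad) == 1
      if cntB ((PySem.List.pyGet? cols p.1).getD []) ((PySem.List.pyGet? cols p.2).getD []) = 1
      then col else loopB cols n rest
    else loopB cols n rest

def checkCol2_alt (block : List String) : Int :=
  let cols := pyZipStar (block.map String.toList)
  loopB cols (cols.length : Int) (PySem.List.pyRange 1 (cols.length : Int) 1)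

-- ===== PRECONDITION & SPEC =====
def Spec_checkCol2 (block : List String) (out : Int) : Prop := out = checkCol2_alt block
instance (block : List String) (out : Int) : Decidable (Spec_checkCol2 block out) := by unfold Spec_checkCol2; infer_instance

-- ===== CLAIM (what is proved, stated in full; the proofs are below) =====
def Claim_equal_checkCol2 : Prop := ∀ (block : List String), Dom_checkCol2 block → Spec_checkCol2 block (checkCol2 block)

-- ===== LEMMAS AND PROOFS =====

theorem checksumA_eq_sum (pairs : List (List Char × List Char)) :
    pairs.foldl
      (fun acc p => (p.1.zip p.2).foldl (fun a q => if q.1 ≠ q.2 then a + 1 else a) acc) 0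
      = (pairs.map (fun p => ((p.1.zip p.2).countP (fun q => decide (q.1 ≠ q.2)) : Int))).sum := by
  have hbody : (fun (acc : Int) (p : List Char × List Char) =>
      (p.1.zip p.2).foldl (fun a q => if q.1 ≠ q.2 then a + 1 else a) acc)
      = fun acc p => acc + ((p.1.zip p.2).countP (fun q => decide (q.1 ≠ q.2)) : Int) := by
    funext acc p
    exact PySem.List.foldl_ite_add_one _ _ _
  rw [hbody, PySem.List.foldl_add]
  simp

theorem cntB_eq_countP (x y : List Char) :
    cntB x y = ((x.zip y).countP (fun q => decide (q.1 ≠ q.2)) : Int) := by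
  unfold cntB
  rw [PySem.List.foldl_ite_add_one]
  simp

theorem zipcount_eq_zero_iff (u v : List Char) (h : u.length = v.length) :
    (u.zip v).countP (fun q => decide (q.1 ≠ q.2)) = 0 ↔ u = v := by
  rw [List.countP_eq_zero]
  constructor
  · intro hall
    apply List.ext_getElem h
    intro i h1 h2
    have hm : (u[i], v[i]) ∈ u.zip v := by
      have : (u.zip v)[i]'(by simp [List.length_zip]; omega) = (u[i], v[i]) := by
        simp [List.getElem_zip]
      exact this ▸ List.getElem_mem _
    have := hall _ hm
    simpa using this
  · rintro rfl q hq
    obtain ⟨i, hi, rfl⟩ := List.mem_iff_getElem.mp hq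
    simp [List.getElem_zip]

theorem sum_eq_one_iff_filter (l : List Nat) :
    l.sum = 1 ↔ l.filter (fun x => decide (x ≠ 0)) = [1] := by
  induction l with
  | nil => simp
  | cons a t ih =>
    have hz : t.sum = 0 ↔ t.filter (fun x => decide (x ≠ 0)) = [] := by
      rw [List.filter_eq_nil_iff, List.sum_eq_zero_iff]
      constructor
      · intro h x hx; simpa using h x hx
      · intro h x hx; simpa using h x hx
    by_cases ha : a = 0
    · subst ha; simpa using ih
    · simp only [List.sum_cons, List.filter_cons, decide_eq_true_eq, if_pos ha]
      constructor
      · intro hs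
        have ha1 : a = 1 := by omega
        rw [ha1, List.cons_eq_cons]
        exact ⟨rfl, hz.mp (by omega)⟩
      · intro hf
        rw [List.cons_eq_cons] at hf
        have := hz.mpr hf.2
        omega

theorem zip_map_range {α β : Type} (f : Nat → α) (g : Nat → β) (a b : Nat) :
    ((List.range a).map f).zip ((List.range b).map g)
      = (List.range (min a b)).map (fun i => (f i, g i)) := by
  apply List.ext_getElem
  · simp [List.length_zip]
  · intro i h1 h2
    simp [List.getElem_zip]

-- the column at index j of zip(*block) in range-map form
def colAt (block : List String) (j : Nat) : List Char :=
  (block.map String.toList).map (fun r => r.getD j ' ')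

theorem colAt_length (block : List String) (j : Nat) :
    (colAt block j).length = block.length := by
  simp [colAt]

-- per-candidate-split equivalence: A's total mismatch count is 1 iff B's two-phase test fires
theorem percol (block : List String) (n : Nat) (col : Int)
    (h1 : 1 ≤ col) (h2 : col < (n : Int)) :
    (let tmp := (List.range n).map (colAt block);
     let above0 := (PySem.List.slice tmp none (some col)).reverse
     let below0 := PySem.List.slice tmp (some col) none
     let above := PySem.List.slice above0 none (some (below0.length : Int))
     let below := PySem.List.slice below0 none (some (above.length : Int))
     checksumA above below = 1) ↔
    (let cols := (List.range n).map (colAt block);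
     let bad := ((PySem.List.pyRange (col - 1) (-1) (-1)).zip (PySem.List.pyRange col (n : Int) 1)).filter
        (fun p => decide (PySem.List.pyGet? cols p.1 ≠ PySem.List.pyGet? cols p.2));
     bad.length = 1 ∧
       cntB ((PySem.List.pyGet? cols (bad.headD (0,0)).1).getD [])
            ((PySem.List.pyGet? cols (bad.headD (0,0)).2).getD []) = 1) := by
  obtain ⟨c, rfl⟩ : ∃ c : Nat, col = (c : Int) := ⟨col.toNat, (Int.toNat_of_nonneg (by omega)).symm⟩
  have hc1 : 1 ≤ c := by exact_mod_cast h1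
  have hc2 : c < n := by exact_mod_cast h2
  set m : Nat := min (n - c) c with hm
  set g : Nat → List Char := colAt block with hg
  -- the per-offset mismatch count
  set d : Nat → Nat := fun i => ((g (c - 1 - i)).zip (g (c + i))).countP (fun q => decide (q.1 ≠ q.2)) with hd
  -- A side: reduce to a sum over range m
  simp only [PySem.List.slice_to_natCast, PySem.List.slice_from_natCast]
  simp only [List.length_take, List.length_drop, List.length_reverse, List.length_map,
    List.length_range]
  have habove : List.take (n - c) (List.take c (List.map g (List.range n))).reverse
      = (List.range m).map (fun i => g (c - 1 - i)) := by
    apply List.ext_getElem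
    · simp only [List.length_take, List.length_reverse, List.length_map, List.length_range]
      omega
    · intro i h1' h2'
      simp only [List.length_take, List.length_reverse, List.length_map, List.length_range] at h1'
      simp only [List.getElem_take, List.getElem_reverse, List.getElem_map, List.getElem_range,
        List.length_take, List.length_map, List.length_range]
      congr 1
      omega
  have hbelow : List.take (min (n - c) (min c n)) (List.drop c (List.map g (List.range n)))
      = (List.range m).map (fun i => g (c + i)) := by
    apply List.ext_getElem
    · simp only [List.length_take, List.length_drop, List.length_map, List.length_range]
      omega
    · intro i h1' h2'
      simp only [List.length_take, List.length_drop, List.length_map, List.length_range] at h1'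
      simp only [List.getElem_take, List.getElem_drop, List.getElem_map, List.getElem_range]
  rw [habove, hbelow]
  unfold checksumA
  rw [checksumA_eq_sum, List.zip_map', List.map_map]
  have hsumA : ((List.range m).map ((fun p : List Char × List Char =>
        ((p.1.zip p.2).countP (fun q => decide (q.1 ≠ q.2)) : Int)) ∘ fun i => (g (c - 1 - i), g (c + i)))).sum
      = (((List.range m).map d).sum : Int) := by
    rw [Nat.cast_list_sum, List.map_map]
    rfl
  rw [hsumA]
  -- B side: the zipped index ranges in range-map form
  have hzip : (PySem.List.pyRange ((c : Int) - 1) (-1) (-1)).zip (PySem.List.pyRange (c : Int) (n : Int) 1)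
      = (List.range m).map (fun i : Nat => ((c : Int) - 1 - (i : Int), (c : Int) + (i : Int))) := by
    rw [PySem.List.pyRange_neg_one, PySem.List.pyRange_one]
    have e1 : ((c : Int) - 1 - (-1)).toNat = c := by omega
    have e2 : ((n : Int) - (c : Int)).toNat = n - c := by omega
    rw [e1, e2, zip_map_range]
    have hmm : min c (n - c) = m := by omega
    rw [hmm]
  rw [hzip, List.filter_map]
  -- the filter predicate on offsets i is exactly "d i ≠ 0"
  have hpred : ∀ i ∈ List.range m,
      ((fun p : Int × Int => decide (PySem.List.pyGet? ((List.range n).map g) p.1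
          ≠ PySem.List.pyGet? ((List.range n).map g) p.2)) ∘
        (fun i : Nat => ((c : Int) - 1 - (i : Int), (c : Int) + (i : Int)))) i
      = decide (d i ≠ 0) := by
    intro i hi
    have him : i < m := List.mem_range.mp hi
    have e1 : (c : Int) - 1 - (i : Int) = ((c - 1 - i : Nat) : Int) := by omega
    have e2 : (c : Int) + (i : Int) = ((c + i : Nat) : Int) := by omega
    simp only [Function.comp_apply, e1, e2, PySem.List.pyGet?_natCast]
    rw [List.getElem?_eq_getElem (by simp; omega), List.getElem?_eq_getElem (by simp; omega)]
    simp only [List.getElem_map, List.getElem_range]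
    have hlen : (g (c - 1 - i)).length = (g (c + i)).length := by
      rw [hg, colAt_length, colAt_length]
    rw [decide_eq_decide]
    simp only [ne_eq, Option.some.injEq]
    rw [hd]
    exact (not_congr (zipcount_eq_zero_iff _ _ hlen)).symm
  rw [List.filter_congr hpred]
  -- now case on the filtered offset list
  have hcast : ((((List.range m).map d).sum : Nat) : Int) = 1 ↔ ((List.range m).map d).sum = 1 := by
    omega
  rw [hcast, sum_eq_one_iff_filter, List.filter_map (p := fun x => decide (x ≠ 0))]
  have hAB : ∀ i ∈ List.range m,
      ((fun x => decide (x ≠ 0)) ∘ d) i = (fun i => decide (d i ≠ 0)) i := fun i _ => rfl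
  rw [List.filter_congr hAB]
  have hsubm : ∀ i ∈ (List.range m).filter (fun i => decide (d i ≠ 0)), i < m :=
    fun i hi => List.mem_range.mp (List.mem_of_mem_filter hi)
  generalize (List.range m).filter (fun i => decide (d i ≠ 0)) = L at hsubm ⊢
  rcases L with _ | ⟨i0, _ | ⟨i1, t⟩⟩
  · simp
  · have hi0 : i0 < m := hsubm i0 (by simp)
    simp only [List.map_cons, List.map_nil, List.length_cons, List.length_nil, List.headD_cons]
    have e1 : (c : Int) - 1 - (i0 : Int) = ((c - 1 - i0 : Nat) : Int) := by omega
    have e2 : (c : Int) + (i0 : Int) = ((c + i0 : Nat) : Int) := by omega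
    simp only [e1, e2, PySem.List.pyGet?_natCast]
    rw [List.getElem?_eq_getElem (by simp; omega), List.getElem?_eq_getElem (by simp; omega)]
    simp only [List.getElem_map, List.getElem_range, Option.getD_some]
    have hshow : ((g (c - 1 - i0)).zip (g (c + i0))).countP (fun q => decide (q.1 ≠ q.2)) = d i0 := rfl
    rw [cntB_eq_countP, hshow]
    constructor
    · intro h
      have hd1 : d i0 = 1 := by simpa using h
      exact ⟨by simp, by exact_mod_cast hd1⟩
    · rintro ⟨-, h⟩
      have hd1 : d i0 = 1 := by exact_mod_cast h
      simp [hd1]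
  · constructor
    · intro h
      simp at h
    · rintro ⟨h, -⟩
      simp at h

-- the two loops agree over any list of valid candidate columns
theorem loop_eq (block : List String) (n : Nat) (colsL : List Int)
    (hcols : ∀ c ∈ colsL, 1 ≤ c ∧ c < (n : Int)) :
    loopA ((List.range n).map (colAt block)) colsL
      = loopB ((List.range n).map (colAt block)) (n : Int) colsL := by
  induction colsL with
  | nil => rfl
  | cons c rest ih =>
    obtain ⟨hc1, hc2⟩ := hcols c (by simp)
    have hiff := percol block n c hc1 hc2
    simp only at hiff
    have ihr := ih (fun x hx => hcols x (by simp [hx]))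
    simp only [loopA, loopB]
    by_cases hA : checksumA
        (PySem.List.slice ((PySem.List.slice ((List.range n).map (colAt block)) none (some c)).reverse) none
          (some ((PySem.List.slice ((List.range n).map (colAt block)) (some c) none).length : Int)))
        (PySem.List.slice (PySem.List.slice ((List.range n).map (colAt block)) (some c) none) none
          (some ((PySem.List.slice ((PySem.List.slice ((List.range n).map (colAt block)) none (some c)).reverse) none
            (some ((PySem.List.slice ((List.range n).map (colAt block)) (some c) none).length : Int))).length : Int))) = 1
    · obtain ⟨hb1, hb2⟩ := hiff.mp hA
      rw [if_pos hA, if_pos hb1, if_pos hb2]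
    · rw [if_neg hA]
      by_cases hb1 : (((PySem.List.pyRange (c - 1) (-1) (-1)).zip (PySem.List.pyRange c (n : Int) 1)).filter
          (fun p => decide (PySem.List.pyGet? ((List.range n).map (colAt block)) p.1
              ≠ PySem.List.pyGet? ((List.range n).map (colAt block)) p.2))).length = 1
      · rw [if_pos hb1]
        have hb2 : ¬ (cntB ((PySem.List.pyGet? ((List.range n).map (colAt block))
              ((((PySem.List.pyRange (c - 1) (-1) (-1)).zip (PySem.List.pyRange c (n : Int) 1)).filter
                (fun p => decide (PySem.List.pyGet? ((List.range n).map (colAt block)) p.1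
                    ≠ PySem.List.pyGet? ((List.range n).map (colAt block)) p.2))).headD (0,0)).1).getD [])
            ((PySem.List.pyGet? ((List.range n).map (colAt block))
              ((((PySem.List.pyRange (c - 1) (-1) (-1)).zip (PySem.List.pyRange c (n : Int) 1)).filter
                (fun p => decide (PySem.List.pyGet? ((List.range n).map (colAt block)) p.1
                    ≠ PySem.List.pyGet? ((List.range n).map (colAt block)) p.2))).headD (0,0)).2).getD []) = 1) := by
          intro hb2
          exact hA (hiff.mpr ⟨hb1, hb2⟩)
        rw [if_neg hb2]
        exact ihr
      · rw [if_neg hb1]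
        exact ihr

theorem getD_tail (r : List Char) (j : Nat) (d : Char) :
    r.tail.getD j d = r.getD (j+1) d := by
  cases r <;> simp [List.getD]

theorem headD_eq_getD (r : List Char) (d : Char) : r.headD d = r.getD 0 d := by
  cases r <;> simp [List.getD]

theorem zipStar_eq (n : Nat) (rows : List (List Char)) (hne : rows ≠ [])
    (hall : ∀ l ∈ rows, n ≤ l.length) (hex : ∃ l ∈ rows, l.length = n) :
    pyZipStar rows = (List.range n).map (fun j => rows.map (fun r => r.getD j ' ')) := by
  induction n generalizing rows with
  | zero =>
    obtain ⟨r, rs, rfl⟩ := List.exists_cons_of_ne_nil hne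
    obtain ⟨l, hl, hl0⟩ := hex
    have hany : ((r :: rs).any (fun l => l.isEmpty)) = true := by
      simp only [List.any_eq_true, List.isEmpty_iff]
      exact ⟨l, hl, List.eq_nil_of_length_eq_zero hl0⟩
    rw [pyZipStar]
    simp [hany]
  | succ n ih =>
    obtain ⟨r, rs, rfl⟩ := List.exists_cons_of_ne_nil hne
    have hany : ¬ (((r :: rs).any (fun l => l.isEmpty)) = true) := by
      simp only [List.any_eq_true, List.isEmpty_iff]
      rintro ⟨l, hl, rfl⟩
      have := hall [] hl
      simp at this
    rw [pyZipStar, dif_neg hany]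
    have hih := ih ((r :: rs).map List.tail) (by simp)
      (by
        intro l hl
        simp only [List.mem_map] at hl
        obtain ⟨l', hl', rfl⟩ := hl
        have := hall l' hl'
        simp [List.length_tail]
        omega)
      (by
        obtain ⟨l, hl, hlen⟩ := hex
        exact ⟨l.tail, List.mem_map_of_mem hl, by simp [List.length_tail, hlen]⟩)
    rw [hih, List.range_succ_eq_map, List.map_cons]
    congr 1
    · show List.map (fun l => l.headD ' ') (r :: rs) = List.map (fun l => l.getD 0 ' ') (r :: rs)
      exact List.map_congr_left (fun l _ => headD_eq_getD l ' ')
    · rw [List.map_map]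
      apply List.map_congr_left
      intro j _
      simp only [Function.comp_apply, List.map_map]
      exact List.map_congr_left (fun l _ => getD_tail l j ' ')

-- ===== VERDICT (by name: the statement is the Claim_ definition above) =====
theorem checkCol2_spec : Claim_equal_checkCol2 := by
  intro block _
  unfold Spec_checkCol2
  cases block with
  | nil =>
    show checkCol2 [] = checkCol2_alt []
    unfold checkCol2 checkCol2_alt
    rw [pyZipStar.eq_def]
    rfl
  | cons s ss =>
    obtain ⟨m0, hm0⟩ : ∃ m0, PySem.List.min?
        ((s :: ss).map (fun r => PySem.Str.len r)) (fun x => x) = some m0 := by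
      cases h : PySem.List.min? ((s :: ss).map (fun r => PySem.Str.len r)) (fun x => x) with
      | none =>
        have := (PySem.List.min?_eq_none_iff _ _).mp h
        simp at this
      | some v => exact ⟨v, rfl⟩
    have hmem := PySem.List.min?_mem hm0
    have hmin := PySem.List.min?_isMin hm0
    obtain ⟨r0, hr0, hr0e⟩ := List.mem_map.mp hmem
    have h0 : 0 ≤ m0 := by
      rw [← hr0e]; simp [PySem.Str.len]
    have hall : ∀ t ∈ (s :: ss), m0.toNat ≤ t.toList.length := by
      intro t ht
      have := hmin (PySem.Str.len t) (List.mem_map_of_mem ht)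
      simp only [PySem.Str.len] at this
      omega
    have hallL : ∀ l ∈ (s :: ss).map String.toList, m0.toNat ≤ l.length := by
      intro l hl
      obtain ⟨t, ht, rfl⟩ := List.mem_map.mp hl
      exact hall t ht
    have hex : ∃ l ∈ (s :: ss).map String.toList, l.length = m0.toNat := by
      refine ⟨r0.toList, List.mem_map_of_mem hr0, ?_⟩
      simp only [PySem.Str.len] at hr0e
      omega
    unfold checkCol2 checkCol2_alt
    rw [zipStar_eq m0.toNat ((s :: ss).map String.toList) (by simp) hallL hex]
    show loopA ((List.range m0.toNat).map (colAt (s :: ss))) _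
        = loopB ((List.range m0.toNat).map (colAt (s :: ss))) _ _
    simp only [List.length_map, List.length_range]
    exact loop_eq (s :: ss) m0.toNat _
      (fun col hcol => PySem.List.mem_pyRange_one.mp hcol)
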